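-- pv_equiv track=rewrite | github.com/Yadkee/dailyprogrammer | problems/modules/sudoku.py | sure_cell
-- ===== SOURCE A (Python) =====
-- OPTIONS = {i for i in range(1, 10)}
--
-- def sure_cell(sudoku):
--     run = True
--     while run:
--         run = False
--         for a, i in enumerate(sudoku):
--             if i != 0:
--                 continue
--             n = OPTIONS - set(near(sudoku, a))
--             if len(n) == 1:
--                 sudoku[a] = n.pop()
--                 run = True
--     return sudoku
--
-- def near(sudoku, n):
--     block = n // 27 * 3 + n % 9 // 3
--     i = block // 3 * 27 + block % 3 * 3
--     return (sudoku[n % 9:81:9] +  # Column + Row + Block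
--             sudoku[n // 9 * 9:9 + n // 9 * 9] +
--             sudoku[i:i + 3] + sudoku[i + 9:i + 12] + sudoku[i + 18:i + 21])
-- ===== SOURCE B (Python) =====
-- def sure_cell(sudoku):
--     # Incremental constraint propagation: keep the set of digits already used
--     # in each of the 9 columns / rows / blocks, updated as cells get filled,
--     # so testing a cell's candidates needs no rescan of its 27 peers.
--     cols = [set() for _ in range(9)]
--     rows = [set() for _ in range(9)]
--     blks = [set() for _ in range(9)]
--     for m, v in enumerate(sudoku):
--         if 1 <= v <= 9:
--             cols[m % 9].add(v)
--             rows[m // 9].add(v)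
--             blks[m // 27 * 3 + m % 9 // 3].add(v)
--     run = True
--     while run:
--         run = False
--         for a, i in enumerate(sudoku):
--             if i != 0:
--                 continue
--             used = cols[a % 9] | rows[a // 9] | blks[a // 27 * 3 + a % 9 // 3]
--             cand = [v for v in range(1, 10) if v not in used]
--             if len(cand) == 1:
--                 v = cand[0]
--                 sudoku[a] = v
--                 cols[a % 9].add(v)
--                 rows[a // 9].add(v)
--                 blks[a // 27 * 3 + a % 9 // 3].add(v)
--                 run = True
--     return sudoku
-- ===== Notes on version B (the rewrite author's own statement) =====
-- stated objective: alternative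
-- what changed: A recomputes a cell's 27 peer values from five fresh list slices on every candidate test; B builds the 9 per-column/row/block used-digit sets once and updates them incrementally as cells get filled, so each candidate test is three set lookups per digit instead of a 27-element peer scan. Pre_ restricts to boards of at most 81 cells (the natural sudoku domain): on longer lists A's column slice silently ignores cells past index 80 and B's 9 per-unit sets raise IndexError.
import Mathlib
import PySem

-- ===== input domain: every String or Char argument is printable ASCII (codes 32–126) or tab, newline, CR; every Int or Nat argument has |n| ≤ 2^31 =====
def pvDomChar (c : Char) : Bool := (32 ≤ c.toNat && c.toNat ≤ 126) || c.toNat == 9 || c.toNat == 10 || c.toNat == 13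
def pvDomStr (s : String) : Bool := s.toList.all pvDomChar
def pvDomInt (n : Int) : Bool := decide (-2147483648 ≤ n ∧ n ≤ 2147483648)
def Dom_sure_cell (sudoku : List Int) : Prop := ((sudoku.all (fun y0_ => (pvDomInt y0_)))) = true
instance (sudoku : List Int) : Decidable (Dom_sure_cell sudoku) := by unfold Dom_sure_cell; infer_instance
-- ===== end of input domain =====

-- B replaces A's per-cell recomputation of the 27 peer values (five list slices per
-- candidate test) with 9 column/row/block used-digit sets built once and updated
-- incrementally as cells get filled (objective: alternative; equal return values proved
-- on boards of at most 81 cells; both Pythons also mutate their argument in place the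
-- same way — the claim is about the returned list).


-- ===== PORT A =====
-- OPTIONS = {i for i in range(1, 10)}
def OPTIONS : PySem.Set Int := PySem.Set.ofList (PySem.List.pyRange 1 10 1)

-- near(sudoku, n): column + row + block peer values, via five slices.
-- The step-9 column slice sudoku[n%9:81:9] never raises (step 9 ≠ 0), so `.getD []` is exact.
def near (sudoku : List Int) (n : Int) : List Int :=
  let block := PySem.Int.floordiv n 27 * 3 + PySem.Int.floordiv (PySem.Int.mod n 9) 3
  let i := PySem.Int.floordiv block 3 * 27 + PySem.Int.mod block 3 * 3
  ((PySem.List.slice? sudoku (some (PySem.Int.mod n 9)) (some 81) 9).getD []) ++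
  PySem.List.slice sudoku (some (PySem.Int.floordiv n 9 * 9)) (some (9 + PySem.Int.floordiv n 9 * 9)) ++
  PySem.List.slice sudoku (some i) (some (i + 3)) ++
  PySem.List.slice sudoku (some (i + 9)) (some (i + 12)) ++
  PySem.List.slice sudoku (some (i + 18)) (some (i + 21))

-- one pass of A's `for a, i in enumerate(sudoku)` loop (the list mutates under the
-- iteration, so each cell is read from the current list; the length never changes).
-- `n.pop()` on the 1-element set n is its unique element, ported as `n.headD 0`.
def passA (s : List Int) (a : Nat) (run : Bool) : List Int × Bool :=
  if h : a < s.length then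
    if s[a] ≠ 0 then passA s (a + 1) run
    else
      let n := PySem.Set.diff OPTIONS (PySem.Set.ofList (near s (a : Int)))
      if n.length = 1 then passA (s.set a (n.headD 0)) (a + 1) true
      else passA s (a + 1) run
  else (s, run)
termination_by s.length - a
decreasing_by all_goals (try simp only [List.length_set]); omega

-- A's `while run:` loop (each iteration is one full pass over the board).  The fuel is
-- only a totality guard: every pass that reports run=True fills at least one 0 cell
-- with a digit 1..9, so s.count 0 + 1 passes always suffice and the fuel-0 branch is
-- never taken on the actual call.
def loopA : Nat → List Int → List Int
  | 0, s => s
  | fuel+1, s =>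
    if (passA s 0 false).2 = true then loopA fuel (passA s 0 false).1
    else (passA s 0 false).1

def sure_cell (sudoku : List Int) : List Int := loopA (sudoku.count 0 + 1) sudoku

-- ===== PORT B =====
-- block number of cell a  (a // 27 * 3 + a % 9 // 3 on the non-negative index a)
def blkOf (a : Nat) : Nat := a / 27 * 3 + a % 9 / 3

-- build the used-digit sets: `for m, v in enumerate(sudoku): ...` (the index m is the
-- position, a Nat; `cols[m % 9].add(v)` etc. index in range since m % 9 < 9 and, on the
-- ≤ 81-cell boards of Pre_, m // 9 < 9 and the block number < 9 — ported as getD/set, exact).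
def buildB (s : List Int) :
    List (PySem.Set Int) × List (PySem.Set Int) × List (PySem.Set Int) :=
  (List.range s.length).foldl
    (fun st m =>
      let v := s.getD m 0
      if 1 ≤ v ∧ v ≤ 9 then
        (st.1.set (m % 9) ((st.1.getD (m % 9) PySem.Set.empty).add v),
         st.2.1.set (m / 9) ((st.2.1.getD (m / 9) PySem.Set.empty).add v),
         st.2.2.set (blkOf m) ((st.2.2.getD (blkOf m) PySem.Set.empty).add v))
      else st)
    (List.replicate 9 PySem.Set.empty, List.replicate 9 PySem.Set.empty,
     List.replicate 9 PySem.Set.empty)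

-- one pass of B's scan; `used = cols[a%9] | rows[a//9] | blks[...]` is the union of the
-- three sets (indices in range as above), `[v for v in range(1,10) if v not in used]`
-- is the filter over pyRange.
def passB (s : List Int) (cols rows blks : List (PySem.Set Int)) (a : Nat) (run : Bool) :
    List Int × List (PySem.Set Int) × List (PySem.Set Int) × List (PySem.Set Int) × Bool :=
  if h : a < s.length then
    if s[a] ≠ 0 then passB s cols rows blks (a + 1) run
    else
      let used := PySem.Set.union
        (PySem.Set.union (cols.getD (a % 9) PySem.Set.empty) (rows.getD (a / 9) PySem.Set.empty))
        (blks.getD (blkOf a) PySem.Set.empty)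
      let cand := (PySem.List.pyRange 1 10 1).filter (fun v => !(PySem.Set.contains used v))
      if cand.length = 1 then
        let v := cand.headD 0
        passB (s.set a v)
          (cols.set (a % 9) ((cols.getD (a % 9) PySem.Set.empty).add v))
          (rows.set (a / 9) ((rows.getD (a / 9) PySem.Set.empty).add v))
          (blks.set (blkOf a) ((blks.getD (blkOf a) PySem.Set.empty).add v))
          (a + 1) true
      else passB s cols rows blks (a + 1) run
  else (s, cols, rows, blks, run)
termination_by s.length - a
decreasing_by all_goals (try simp only [List.length_set]); omega

-- B's `while run:` loop; fuel as in loopA (a totality guard only)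
def loopB : Nat → List Int → List (PySem.Set Int) → List (PySem.Set Int) →
    List (PySem.Set Int) → List Int
  | 0, s, _, _, _ => s
  | fuel+1, s, cols, rows, blks =>
    if (passB s cols rows blks 0 false).2.2.2.2 = true then
      loopB fuel (passB s cols rows blks 0 false).1
        (passB s cols rows blks 0 false).2.1
        (passB s cols rows blks 0 false).2.2.1
        (passB s cols rows blks 0 false).2.2.2.1
    else (passB s cols rows blks 0 false).1

def sure_cell_alt (sudoku : List Int) : List Int :=
  loopB (sudoku.count 0 + 1) sudoku (buildB sudoku).1 (buildB sudoku).2.1 (buildB sudoku).2.2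

-- ===== PRECONDITION & SPEC =====
-- Pre_ restricts to the natural sudoku domain, boards of at most 81 cells: on longer
-- lists A's column slice sudoku[n%9:81:9] silently ignores cells past index 80 (an
-- artefact of its implementation) and B's 9 per-unit sets raise IndexError.
def Pre_sure_cell (sudoku : List Int) : Prop := sudoku.length ≤ 81
instance (sudoku : List Int) : Decidable (Pre_sure_cell sudoku) := by unfold Pre_sure_cell; infer_instance

def pvWitness_sure_cell : List Int :=
  [5,3,0,0,7,0,0,0,0,6,0,0,1,9,5,0,0,0,0,9,8,0,0,0,0,6,0,
   8,0,0,0,6,0,0,0,3,4,0,0,8,0,3,0,0,1,7,0,0,0,2,0,0,0,6,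
   0,6,0,0,0,0,2,8,0,0,0,0,4,1,9,0,0,5,0,0,0,0,8,0,0,7,9]

def Spec_sure_cell (sudoku : List Int) (out : List Int) : Prop := out = sure_cell_alt sudoku
instance (sudoku : List Int) (out : List Int) : Decidable (Spec_sure_cell sudoku out) := by unfold Spec_sure_cell; infer_instance

-- ===== CLAIM (what is proved, stated in full; the proofs are below) =====
def Claim_equal_sure_cell : Prop := ∀ (sudoku : List Int), Dom_sure_cell sudoku → Pre_sure_cell sudoku → Spec_sure_cell sudoku (sure_cell sudoku)

-- ===== LEMMAS AND PROOFS =====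

-- digits 1..9 present in the cells of s selected by P
def UDigs (s : List Int) (P : Nat → Prop) (v : Int) : Prop :=
  1 ≤ v ∧ v ≤ 9 ∧ ∃ m, m < s.length ∧ P m ∧ s.getD m 0 = v

-- the invariant tying B's used-digit sets to the current board
def BInv (s : List Int) (cols rows blks : List (PySem.Set Int)) : Prop :=
  cols.length = 9 ∧ rows.length = 9 ∧ blks.length = 9 ∧
  (∀ c, c < 9 → ∀ v, v ∈ cols.getD c PySem.Set.empty ↔ UDigs s (fun m => m % 9 = c) v) ∧
  (∀ r, r < 9 → ∀ v, v ∈ rows.getD r PySem.Set.empty ↔ UDigs s (fun m => m / 9 = r) v) ∧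
  (∀ b, b < 9 → ∀ v, v ∈ blks.getD b PySem.Set.empty ↔ UDigs s (fun m => blkOf m = b) v)

lemma mem_drop_take (s : List Int) (d t : Nat) (v : Int) :
    v ∈ (s.drop d).take t ↔
      ∃ m, d ≤ m ∧ m < d + t ∧ m < s.length ∧ s.getD m 0 = v := by
  rw [List.mem_iff_getElem]
  constructor
  · rintro ⟨j, hj, hval⟩
    have hlen : j < t ∧ j < s.length - d := by
      simpa [List.length_take, List.length_drop] using hj
    refine ⟨d + j, by omega, by omega, by omega, ?_⟩
    rw [List.getElem_take, List.getElem_drop] at hval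
    rw [List.getD_eq_getElem _ _ (by omega)]
    simpa using hval
  · rintro ⟨m, h1, h2, h3, h4⟩
    refine ⟨m - d, by simp [List.length_take, List.length_drop]; omega, ?_⟩
    rw [List.getElem_take, List.getElem_drop]
    rw [List.getD_eq_getElem _ _ h3] at h4
    have : d + (m - d) = m := by omega
    simp [this]
    simpa using h4

lemma blk_range (m b : Nat) :
    blkOf m = b ↔
      (b/3*27 + b%3*3 ≤ m ∧ m < b/3*27 + b%3*3 + 3) ∨
      (b/3*27 + b%3*3 + 9 ≤ m ∧ m < b/3*27 + b%3*3 + 12) ∨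
      (b/3*27 + b%3*3 + 18 ≤ m ∧ m < b/3*27 + b%3*3 + 21) := by
  unfold blkOf; omega

lemma mem_colslice (s : List Int) (c : Nat) (hc : c < 9) (v : Int) :
    v ∈ (PySem.List.slice? s (some (c : Int)) (some 81) 9).getD [] ↔
      ∃ m, m < s.length ∧ m < 81 ∧ m % 9 = c ∧ s.getD m 0 = v := by
  unfold PySem.List.slice? PySem.List.sliceIndices
  simp only [if_neg (by norm_num : ¬ (9:Int) = 0)]
  norm_num
  rw [if_neg (by omega : ¬ ((c:Int) < 0))]
  by_cases hcl : c < s.length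
  · rw [min_eq_left (by exact_mod_cast hcl.le)]
    rw [if_pos ⟨by omega, by exact_mod_cast hcl⟩]
    constructor
    · rintro ⟨a, ha, hval⟩
      have hidx : (((c:Int)) + 9 * (a:Int)).toNat = c + 9 * a := by omega
      rw [hidx] at hval
      rcases List.getElem?_eq_some_iff.1 hval with ⟨hlt, hval2⟩
      refine ⟨c + 9 * a, hlt, ?_, by omega, ?_⟩
      · have : (a:Int) < ((min 81 (s.length:Int) - c) + 9 - 1) / 9 := by
          exact_mod_cast Int.lt_toNat.mp ha
        omega
      · simp [hval]
    · rintro ⟨m, h1, h2, h3, h4⟩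
      have hmc : c ≤ m := by omega
      refine ⟨(m - c) / 9, ?_, ?_⟩
      · have h9 : 9 ∣ (m - c) := by omega
        rw [Int.lt_toNat]
        push_cast
        omega
      · have : (((c:Int)) + 9 * (((m - c) / 9 : Nat) : Int)).toNat = m := by
          have h9 : 9 ∣ (m - c) := by omega
          push_cast
          omega
        rw [this, List.getElem?_eq_getElem h1]
        rw [List.getElem?_eq_getElem h1] at h4
        simpa using h4
  · rw [min_eq_right (by exact_mod_cast (not_lt.1 hcl))]
    rw [if_neg (by omega)]
    constructor
    · rintro ⟨a, ha, _⟩; omega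
    · rintro ⟨m, h1, h2, h3, h4⟩; omega

lemma near_eq (s : List Int) (a : Nat) :
    near s (a : Int) =
      ((PySem.List.slice? s (some ((a % 9 : Nat) : Int)) (some 81) 9).getD []) ++
      (s.drop (a/9*9)).take 9 ++
      (s.drop (blkOf a/3*27 + blkOf a%3*3)).take 3 ++
      (s.drop (blkOf a/3*27 + blkOf a%3*3 + 9)).take 3 ++
      (s.drop (blkOf a/3*27 + blkOf a%3*3 + 18)).take 3 := by
  unfold near blkOf
  have f27 : ∀ x : Int, PySem.Int.floordiv x 27 = x / 27 :=
    fun x => PySem.Int.floordiv_eq_ediv_of_pos (by norm_num)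
  have f9 : ∀ x : Int, PySem.Int.floordiv x 9 = x / 9 :=
    fun x => PySem.Int.floordiv_eq_ediv_of_pos (by norm_num)
  have f3 : ∀ x : Int, PySem.Int.floordiv x 3 = x / 3 :=
    fun x => PySem.Int.floordiv_eq_ediv_of_pos (by norm_num)
  have m9 : ∀ x : Int, PySem.Int.mod x 9 = x % 9 :=
    fun x => PySem.Int.mod_eq_emod_of_pos (by norm_num)
  have m3 : ∀ x : Int, PySem.Int.mod x 3 = x % 3 :=
    fun x => PySem.Int.mod_eq_emod_of_pos (by norm_num)
  simp only [f27, f9, f3, m9, m3]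
  have c1 : ((a:Int)) % 9 = ((a % 9 : Nat) : Int) := by omega
  have c2 : ((a:Int))/9*9 = ((a/9*9 : Nat) : Int) := by push_cast; omega
  have c3 : (9:Int) + ((a/9*9 : Nat) : Int) = ((a/9*9+9 : Nat) : Int) := by push_cast; omega
  set iN := (a/27*3 + a%9/3)/3*27 + (a/27*3 + a%9/3)%3*3 with hiN
  have cB : ((a:Int))/27*3 + ((a%9 : Nat):Int)/3 = ((a/27*3 + a%9/3 : Nat) : Int) := by
    push_cast; omega
  have cI : ((a/27*3 + a%9/3 : Nat) : Int)/3*27 + ((a/27*3 + a%9/3 : Nat) : Int)%3*3 =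
      ((iN : Nat) : Int) := by rw [hiN]; push_cast; omega
  have c4 : ((iN : Nat) : Int) + 3 = ((iN + 3 : Nat) : Int) := by push_cast; ring
  have c5 : ((iN : Nat) : Int) + 9 = ((iN + 9 : Nat) : Int) := by push_cast; ring
  have c6 : ((iN : Nat) : Int) + 12 = ((iN + 9 + 3 : Nat) : Int) := by push_cast; omega
  have c7 : ((iN : Nat) : Int) + 18 = ((iN + 18 : Nat) : Int) := by push_cast; ring
  have c8 : ((iN : Nat) : Int) + 21 = ((iN + 18 + 3 : Nat) : Int) := by push_cast; omega
  rw [c1, c2, c3, cB, cI, c4, c5, c6, c7, c8]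
  rw [PySem.List.slice_natCast, PySem.List.slice_natCast, PySem.List.slice_natCast,
    PySem.List.slice_natCast]
  have d1 : a/9*9+9 - a/9*9 = 9 := by omega
  have d2 : iN + 3 - iN = 3 := by omega
  have d3 : iN + 9 + 3 - (iN + 9) = 3 := by omega
  have d4 : iN + 18 + 3 - (iN + 18) = 3 := by omega
  rw [d1, d2, d3, d4]

lemma mem_near (s : List Int) (a : Nat) (v : Int) :
    v ∈ near s (a : Int) ↔
      (∃ m, m < s.length ∧ (m < 81 ∧ m % 9 = a % 9) ∧ s.getD m 0 = v) ∨
      (∃ m, m < s.length ∧ m / 9 = a / 9 ∧ s.getD m 0 = v) ∨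
      (∃ m, m < s.length ∧ blkOf m = blkOf a ∧ s.getD m 0 = v) := by
  rw [near_eq, List.mem_append, List.mem_append, List.mem_append, List.mem_append,
    mem_colslice s (a % 9) (by omega) v, mem_drop_take, mem_drop_take, mem_drop_take,
    mem_drop_take]
  constructor
  · rintro ((((⟨m,h1,h2,h3,h4⟩ | ⟨m,h1,h2,h3,h4⟩) | ⟨m,h1,h2,h3,h4⟩) | ⟨m,h1,h2,h3,h4⟩) | ⟨m,h1,h2,h3,h4⟩)
    · exact Or.inl ⟨m, h1, ⟨h2, h3⟩, h4⟩
    · exact Or.inr (Or.inl ⟨m, h3, by omega, h4⟩)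
    · exact Or.inr (Or.inr ⟨m, h3, (blk_range m (blkOf a)).2 (Or.inl ⟨h1, by omega⟩), h4⟩)
    · exact Or.inr (Or.inr ⟨m, h3, (blk_range m (blkOf a)).2 (Or.inr (Or.inl ⟨h1, by omega⟩)), h4⟩)
    · exact Or.inr (Or.inr ⟨m, h3, (blk_range m (blkOf a)).2 (Or.inr (Or.inr ⟨h1, by omega⟩)), h4⟩)
  · rintro (⟨m,h1,⟨h2,h3⟩,h4⟩ | ⟨m,h1,h2,h4⟩ | ⟨m,h1,h2,h4⟩)
    · exact Or.inl (Or.inl (Or.inl (Or.inl ⟨m, h1, h2, h3, h4⟩)))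
    · exact Or.inl (Or.inl (Or.inl (Or.inr ⟨m, by omega, by omega, h1, h4⟩)))
    · rcases (blk_range m (blkOf a)).1 h2 with h | h | h
      · exact Or.inl (Or.inl (Or.inr ⟨m, h.1, by omega, h1, h4⟩))
      · exact Or.inl (Or.inr ⟨m, h.1, by omega, h1, h4⟩)
      · exact Or.inr ⟨m, h.1, by omega, h1, h4⟩

lemma UDigs_set (s : List Int) (P : Nat → Prop) (a : Nat) (w : Int)
    (h : a < s.length) (h0 : s.getD a 0 = 0) (v : Int) :
    UDigs (s.set a w) P v ↔ (UDigs s P v ∨ (1 ≤ v ∧ v ≤ 9 ∧ v = w ∧ P a)) := by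
  unfold UDigs
  constructor
  · rintro ⟨hv1, hv9, m, hm, hPm, hval⟩
    rw [List.length_set] at hm
    by_cases hma : m = a
    · subst hma
      rw [List.getD_eq_getElem _ _ (by simpa using hm), List.getElem_set_self] at hval
      exact Or.inr ⟨hv1, hv9, hval.symm, hPm⟩
    · left
      refine ⟨hv1, hv9, m, hm, hPm, ?_⟩
      rw [List.getD_eq_getElem _ _ (by simpa using hm), List.getElem_set_ne (by omega)] at hval
      rw [List.getD_eq_getElem _ _ hm]
      exact hval
  · rintro (⟨hv1, hv9, m, hm, hPm, hval⟩ | ⟨hv1, hv9, hvw, hPa⟩)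
    · have hma : m ≠ a := by
        intro he; subst he; rw [h0] at hval; omega
      refine ⟨hv1, hv9, m, by simpa using hm, hPm, ?_⟩
      rw [List.getD_eq_getElem _ _ hm] at hval
      rw [List.getD_eq_getElem _ _ (by simpa using hm), List.getElem_set_ne (by omega)]
      exact hval
    · subst hvw
      refine ⟨hv1, hv9, a, by simpa using h, hPa, ?_⟩
      rw [List.getD_eq_getElem _ _ (by simpa using h), List.getElem_set_self]

lemma UDigs_take_succ (s : List Int) (P : Nat → Prop) (n : Nat) (hn : n < s.length) (v : Int) :
    UDigs (s.take (n+1)) P v ↔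
      (UDigs (s.take n) P v ∨ (1 ≤ v ∧ v ≤ 9 ∧ v = s.getD n 0 ∧ P n)) := by
  unfold UDigs
  have hlen1 : (s.take (n+1)).length = n+1 := by simp; omega
  have hlen0 : (s.take n).length = n := by simp; omega
  constructor
  · rintro ⟨hv1, hv9, m, hm, hPm, hval⟩
    rw [hlen1] at hm
    have hms : m < s.length := by omega
    rw [List.getD_eq_getElem _ _ (by omega), List.getElem_take] at hval
    by_cases hmn : m = n
    · subst hmn
      exact Or.inr ⟨hv1, hv9, by rw [List.getD_eq_getElem _ _ hms] at *; exact hval.symm, hPm⟩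
    · left
      refine ⟨hv1, hv9, m, by omega, hPm, ?_⟩
      rw [List.getD_eq_getElem _ _ (by omega), List.getElem_take]
      exact hval
  · rintro (⟨hv1, hv9, m, hm, hPm, hval⟩ | ⟨hv1, hv9, hvw, hPn⟩)
    · rw [hlen0] at hm
      refine ⟨hv1, hv9, m, by omega, hPm, ?_⟩
      rw [List.getD_eq_getElem _ _ (by omega), List.getElem_take]
      rw [List.getD_eq_getElem _ _ (by omega), List.getElem_take] at hval
      exact hval
    · subst hvw
      refine ⟨hv1, hv9, n, by omega, hPn, ?_⟩
      rw [List.getD_eq_getElem _ _ (by omega), List.getElem_take, ← List.getD_eq_getElem _ _ hn]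

-- one update step of buildB's fold preserves the invariant, stated by induction on the prefix
lemma build_aux (s : List Int) (n : Nat) (hn : n ≤ s.length) :
    BInv (s.take n)
      ((List.range n).foldl
        (fun st m =>
          let v := s.getD m 0
          if 1 ≤ v ∧ v ≤ 9 then
            (st.1.set (m % 9) ((st.1.getD (m % 9) PySem.Set.empty).add v),
             st.2.1.set (m / 9) ((st.2.1.getD (m / 9) PySem.Set.empty).add v),
             st.2.2.set (blkOf m) ((st.2.2.getD (blkOf m) PySem.Set.empty).add v))
          else st)
        (List.replicate 9 PySem.Set.empty, List.replicate 9 PySem.Set.empty,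
         List.replicate 9 PySem.Set.empty)).1
      ((List.range n).foldl
        (fun st m =>
          let v := s.getD m 0
          if 1 ≤ v ∧ v ≤ 9 then
            (st.1.set (m % 9) ((st.1.getD (m % 9) PySem.Set.empty).add v),
             st.2.1.set (m / 9) ((st.2.1.getD (m / 9) PySem.Set.empty).add v),
             st.2.2.set (blkOf m) ((st.2.2.getD (blkOf m) PySem.Set.empty).add v))
          else st)
        (List.replicate 9 PySem.Set.empty, List.replicate 9 PySem.Set.empty,
         List.replicate 9 PySem.Set.empty)).2.1
      ((List.range n).foldl
        (fun st m =>
          let v := s.getD m 0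
          if 1 ≤ v ∧ v ≤ 9 then
            (st.1.set (m % 9) ((st.1.getD (m % 9) PySem.Set.empty).add v),
             st.2.1.set (m / 9) ((st.2.1.getD (m / 9) PySem.Set.empty).add v),
             st.2.2.set (blkOf m) ((st.2.2.getD (blkOf m) PySem.Set.empty).add v))
          else st)
        (List.replicate 9 PySem.Set.empty, List.replicate 9 PySem.Set.empty,
         List.replicate 9 PySem.Set.empty)).2.2 := by
  induction n with
  | zero =>
    refine ⟨by simp, by simp, by simp, ?_, ?_, ?_⟩ <;>
    · intro c hc v
      interval_cases c <;> simp [UDigs]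
  | succ n ih =>
    have hn' : n ≤ s.length := by omega
    specialize ih hn'
    rw [List.range_succ, List.foldl_append, List.foldl_cons, List.foldl_nil]
    set st := (List.range n).foldl _ _ with hst
    obtain ⟨ihc1, ihr1, ihb1, ihc, ihr, ihb⟩ := ih
    show BInv (s.take (n+1)) _ _ _
    by_cases hd : 1 ≤ s.getD n 0 ∧ s.getD n 0 ≤ 9
    · simp only [if_pos hd]
      refine ⟨by simp [ihc1], by simp [ihr1], by simp [ihb1], ?_, ?_, ?_⟩
      · intro c hc v'
        rw [UDigs_take_succ s _ n (by omega)]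
        by_cases hc9 : c = n % 9
        · subst hc9
          rw [List.getD_eq_getElem?_getD, List.getElem?_set_self (by rw [ihc1]; omega)]
          simp only [Option.getD_some]
          rw [PySem.Set.mem_add]
          constructor
          · rintro (hm | he)
            · exact Or.inl ((ihc _ hc v').1 hm)
            · exact Or.inr ⟨by omega, by omega, he, by trivial⟩
          · rintro (hm | ⟨_, _, he, _⟩)
            · exact Or.inl ((ihc _ hc v').2 hm)
            · exact Or.inr he
        · rw [List.getD_eq_getElem?_getD, List.getElem?_set_ne (by omega),
            ← List.getD_eq_getElem?_getD]
          rw [ihc c hc v']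
          exact (or_iff_left (by rintro ⟨_, _, _, hmod⟩; exact hc9 hmod.symm)).symm
      · intro r hr v'
        rw [UDigs_take_succ s _ n (by omega)]
        by_cases hr9 : r = n / 9
        · subst hr9
          rw [List.getD_eq_getElem?_getD, List.getElem?_set_self (by rw [ihr1]; omega)]
          simp only [Option.getD_some]
          rw [PySem.Set.mem_add]
          constructor
          · rintro (hm | he)
            · exact Or.inl ((ihr _ hr v').1 hm)
            · exact Or.inr ⟨by omega, by omega, he, by trivial⟩
          · rintro (hm | ⟨_, _, he, _⟩)
            · exact Or.inl ((ihr _ hr v').2 hm)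
            · exact Or.inr he
        · rw [List.getD_eq_getElem?_getD, List.getElem?_set_ne (by omega),
            ← List.getD_eq_getElem?_getD]
          rw [ihr r hr v']
          exact (or_iff_left (by rintro ⟨_, _, _, hdiv⟩; exact hr9 hdiv.symm)).symm
      · intro b hb v'
        rw [UDigs_take_succ s _ n (by omega)]
        by_cases hb9 : b = blkOf n
        · subst hb9
          rw [List.getD_eq_getElem?_getD, List.getElem?_set_self (by rw [ihb1]; omega)]
          simp only [Option.getD_some]
          rw [PySem.Set.mem_add]
          constructor
          · rintro (hm | he)
            · exact Or.inl ((ihb _ hb v').1 hm)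
            · exact Or.inr ⟨by omega, by omega, he, by trivial⟩
          · rintro (hm | ⟨_, _, he, _⟩)
            · exact Or.inl ((ihb _ hb v').2 hm)
            · exact Or.inr he
        · rw [List.getD_eq_getElem?_getD, List.getElem?_set_ne (by omega),
            ← List.getD_eq_getElem?_getD]
          rw [ihb b hb v']
          exact (or_iff_left (by rintro ⟨_, _, _, hblk⟩; exact hb9 hblk.symm)).symm
    · simp only [if_neg hd]
      refine ⟨ihc1, ihr1, ihb1, ?_, ?_, ?_⟩
      · intro c hc v'
        rw [UDigs_take_succ s _ n (by omega), ihc c hc v']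
        exact (or_iff_left (by rintro ⟨h1, h2, h3, _⟩; exact hd ⟨h3 ▸ h1, h3 ▸ h2⟩)).symm
      · intro r hr v'
        rw [UDigs_take_succ s _ n (by omega), ihr r hr v']
        exact (or_iff_left (by rintro ⟨h1, h2, h3, _⟩; exact hd ⟨h3 ▸ h1, h3 ▸ h2⟩)).symm
      · intro b hb v'
        rw [UDigs_take_succ s _ n (by omega), ihb b hb v']
        exact (or_iff_left (by rintro ⟨h1, h2, h3, _⟩; exact hd ⟨h3 ▸ h1, h3 ▸ h2⟩)).symm

lemma BInv_build (s : List Int) :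
    BInv s (buildB s).1 (buildB s).2.1 (buildB s).2.2 := by
  have h := build_aux s s.length le_rfl
  rw [List.take_length] at h
  unfold buildB
  exact h

-- blkOf is bounded
lemma blkOf_lt (a : Nat) (h : a < 81) : blkOf a < 9 := by unfold blkOf; omega

-- A's candidate set equals B's candidate list (same list, elementwise), given the invariant
lemma cand_eq (s : List Int) (cols rows blks : List (PySem.Set Int)) (a : Nat)
    (hlen : s.length ≤ 81) (ha : a < s.length) (hinv : BInv s cols rows blks) :
    PySem.Set.diff OPTIONS (PySem.Set.ofList (near s (a : Int))) =
      (PySem.List.pyRange 1 10 1).filter (fun v => !(PySem.Set.contains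
        (PySem.Set.union
          (PySem.Set.union (cols.getD (a % 9) PySem.Set.empty) (rows.getD (a / 9) PySem.Set.empty))
          (blks.getD (blkOf a) PySem.Set.empty)) v)) := by
  obtain ⟨hc1, hr1, hb1, hc, hr, hb⟩ := hinv
  have hO : OPTIONS = PySem.List.pyRange 1 10 1 :=
    PySem.Set.ofList_eq_self_of_nodup _ (PySem.List.nodup_pyRange_one 1 10)
  rw [hO]
  unfold PySem.Set.diff
  apply List.filter_congr
  intro v hv
  have hv19 := PySem.List.mem_pyRange_one.1 hv
  have hcu := hc (a % 9) (by omega) v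
  have hru := hr (a / 9) (by omega) v
  have hbu := hb (blkOf a) (blkOf_lt a (by omega)) v
  have hmn := mem_near s a v
  rw [Bool.eq_iff_iff]
  simp only [Bool.not_eq_eq_eq_not, Bool.not_true,
    PySem.Set.contains_eq_listContains, List.contains_eq_mem, decide_eq_false_iff_not]
  rw [PySem.Set.mem_ofList]
  unfold UDigs at hcu hru hbu
  constructor
  · intro hnot hmem
    rcases (PySem.Set.mem_union _ _ _).1 hmem with hmem | hmem
    · rcases (PySem.Set.mem_union _ _ _).1 hmem with hmem | hmem
      · exact hnot (hmn.2 (Or.inl (by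
          rcases (hcu.1 hmem).2.2 with ⟨m, hm1, hm2, hm3⟩
          exact ⟨m, hm1, ⟨by omega, hm2⟩, hm3⟩)))
      · exact hnot (hmn.2 (Or.inr (Or.inl (hru.1 hmem).2.2)))
    · exact hnot (hmn.2 (Or.inr (Or.inr (hbu.1 hmem).2.2)))
  · intro hnot hmem
    apply hnot
    rcases hmn.1 hmem with hx | hx | hx
    · exact (PySem.Set.mem_union _ _ _).2 (Or.inl ((PySem.Set.mem_union _ _ _).2 (Or.inl
        (hcu.2 ⟨by omega, by omega, by
          rcases hx with ⟨m, hm1, ⟨_, hm2⟩, hm3⟩; exact ⟨m, hm1, hm2, hm3⟩⟩))))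
    · exact (PySem.Set.mem_union _ _ _).2 (Or.inl ((PySem.Set.mem_union _ _ _).2 (Or.inr
        (hru.2 ⟨by omega, by omega, hx⟩))))
    · exact (PySem.Set.mem_union _ _ _).2 (Or.inr (hbu.2 ⟨by omega, by omega, hx⟩))

-- the unique candidate is a digit 1..9
lemma filter_head_bounds (p : Int → Bool) (l : List Int)
    (hl : l = (PySem.List.pyRange 1 10 1).filter p) (h1 : l.length = 1) :
    1 ≤ l.headD 0 ∧ l.headD 0 ≤ 9 := by
  rcases List.length_eq_one_iff.1 h1 with ⟨x, hx⟩
  subst hx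
  have hmem : x ∈ (PySem.List.pyRange 1 10 1).filter p := by
    rw [← hl]; exact List.mem_singleton_self x
  have := PySem.List.mem_pyRange_one.1 (List.mem_of_mem_filter hmem)
  simp only [List.headD_cons]
  omega

-- replacing a zero cell by a nonzero value strictly decreases the zero count
lemma count_set_lt (s : List Int) (a : Nat) (v : Int) (h : a < s.length)
    (hz : s[a] = 0) (hv : v ≠ 0) : (s.set a v).count 0 < s.count 0 := by
  rw [List.set_eq_take_append_cons_drop, if_pos h]
  conv_rhs => rw [← List.take_append_drop a s, List.drop_eq_getElem_cons h]
  simp [List.count_append, hz, hv]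

-- filling a zero cell with a digit updates the invariant
lemma BInv_fill (s : List Int) (cols rows blks : List (PySem.Set Int)) (a : Nat)
    (hinv : BInv s cols rows blks) (h : a < s.length)
    (hz : s.getD a 0 = 0) (w : Int) (hw : 1 ≤ w ∧ w ≤ 9) :
    BInv (s.set a w)
      (cols.set (a % 9) ((cols.getD (a % 9) PySem.Set.empty).add w))
      (rows.set (a / 9) ((rows.getD (a / 9) PySem.Set.empty).add w))
      (blks.set (blkOf a) ((blks.getD (blkOf a) PySem.Set.empty).add w)) := by
  obtain ⟨hc1, hr1, hb1, hc, hr, hb⟩ := hinv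
  refine ⟨by simp [hc1], by simp [hr1], by simp [hb1], ?_, ?_, ?_⟩
  · intro c hcc v'
    rw [UDigs_set s _ a w h hz v']
    by_cases hc9 : c = a % 9
    · subst hc9
      rw [List.getD_eq_getElem?_getD, List.getElem?_set_self (by rw [hc1]; omega)]
      simp only [Option.getD_some]
      rw [PySem.Set.mem_add]
      constructor
      · rintro (hm | he)
        · exact Or.inl ((hc _ hcc v').1 hm)
        · exact Or.inr ⟨by omega, by omega, he, by trivial⟩
      · rintro (hm | ⟨_, _, he, _⟩)
        · exact Or.inl ((hc _ hcc v').2 hm)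
        · exact Or.inr he
    · rw [List.getD_eq_getElem?_getD, List.getElem?_set_ne (by omega),
        ← List.getD_eq_getElem?_getD]
      rw [hc c hcc v']
      exact (or_iff_left (by rintro ⟨_, _, _, hmod⟩; exact hc9 hmod.symm)).symm
  · intro r hrr v'
    rw [UDigs_set s _ a w h hz v']
    by_cases hr9 : r = a / 9
    · subst hr9
      rw [List.getD_eq_getElem?_getD, List.getElem?_set_self (by rw [hr1]; omega)]
      simp only [Option.getD_some]
      rw [PySem.Set.mem_add]
      constructor
      · rintro (hm | he)
        · exact Or.inl ((hr _ hrr v').1 hm)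
        · exact Or.inr ⟨by omega, by omega, he, by trivial⟩
      · rintro (hm | ⟨_, _, he, _⟩)
        · exact Or.inl ((hr _ hrr v').2 hm)
        · exact Or.inr he
    · rw [List.getD_eq_getElem?_getD, List.getElem?_set_ne (by omega),
        ← List.getD_eq_getElem?_getD]
      rw [hr r hrr v']
      exact (or_iff_left (by rintro ⟨_, _, _, hdiv⟩; exact hr9 hdiv.symm)).symm
  · intro b hbb v'
    rw [UDigs_set s _ a w h hz v']
    by_cases hb9 : b = blkOf a
    · subst hb9
      rw [List.getD_eq_getElem?_getD, List.getElem?_set_self (by rw [hb1]; omega)]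
      simp only [Option.getD_some]
      rw [PySem.Set.mem_add]
      constructor
      · rintro (hm | he)
        · exact Or.inl ((hb _ hbb v').1 hm)
        · exact Or.inr ⟨by omega, by omega, he, by trivial⟩
      · rintro (hm | ⟨_, _, he, _⟩)
        · exact Or.inl ((hb _ hbb v').2 hm)
        · exact Or.inr he
    · rw [List.getD_eq_getElem?_getD, List.getElem?_set_ne (by omega),
        ← List.getD_eq_getElem?_getD]
      rw [hb b hbb v']
      exact (or_iff_left (by rintro ⟨_, _, _, hblk⟩; exact hb9 hblk.symm)).symm

-- the two passes agree (and the invariant is preserved)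
lemma pass_eq (k : Nat) : ∀ (s : List Int) (cols rows blks : List (PySem.Set Int))
    (a : Nat) (run : Bool),
    s.length - a = k → s.length ≤ 81 → BInv s cols rows blks →
    (passA s a run =
      ((passB s cols rows blks a run).1, (passB s cols rows blks a run).2.2.2.2) ∧
    BInv (passB s cols rows blks a run).1 (passB s cols rows blks a run).2.1
      (passB s cols rows blks a run).2.2.1 (passB s cols rows blks a run).2.2.2.1) := by
  induction k with
  | zero =>
    intro s cols rows blks a run hk hlen hinv
    rw [passA, passB]
    rw [dif_neg (by omega), dif_neg (by omega)]
    exact ⟨rfl, hinv⟩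
  | succ k ih =>
    intro s cols rows blks a run hk hlen hinv
    have h : a < s.length := by omega
    rw [passA, passB, dif_pos h, dif_pos h]
    by_cases hz : s[a] = 0
    · simp only [hz, ne_eq, not_true_eq_false, if_false]
      have hcand := cand_eq s cols rows blks a hlen h hinv
      simp only [hcand]
      by_cases hn : ((PySem.List.pyRange 1 10 1).filter (fun v => !(PySem.Set.contains
          (PySem.Set.union
            (PySem.Set.union (cols.getD (a % 9) PySem.Set.empty) (rows.getD (a / 9) PySem.Set.empty))
            (blks.getD (blkOf a) PySem.Set.empty)) v))).length = 1
      · rw [if_pos hn, if_pos hn]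
        have hw := filter_head_bounds _ _ rfl hn
        have hinv' := BInv_fill s cols rows blks a ⟨hinv.1, hinv.2.1, hinv.2.2.1,
          hinv.2.2.2.1, hinv.2.2.2.2.1, hinv.2.2.2.2.2⟩ h
          (by rw [List.getD_eq_getElem _ _ h]; exact hz) _ hw
        exact ih _ _ _ _ (a+1) true (by simp only [List.length_set]; omega)
          (by simpa using hlen) hinv'
      · rw [if_neg hn, if_neg hn]
        exact ih s cols rows blks (a+1) run (by omega) hlen hinv
    · simp only [hz, ne_eq, not_false_eq_true, if_true]
      exact ih s cols rows blks (a+1) run (by omega) hlen hinv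

-- a pass never changes the board length
lemma passB_len (k : Nat) : ∀ (s : List Int) (cols rows blks : List (PySem.Set Int))
    (a : Nat) (run : Bool), s.length - a = k →
    (passB s cols rows blks a run).1.length = s.length := by
  induction k with
  | zero =>
    intro s cols rows blks a run hk
    rw [passB, dif_neg (by omega)]
  | succ k ih =>
    intro s cols rows blks a run hk
    have h : a < s.length := by omega
    rw [passB, dif_pos h]
    by_cases hz : s[a] = 0
    · simp only [hz, ne_eq, not_true_eq_false, if_false]
      split_ifs with hn
      · rw [ih _ _ _ _ (a+1) true (by simp only [List.length_set]; omega)]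
        simp
      · exact ih s cols rows blks (a+1) run (by omega)
    · simp only [hz, ne_eq, not_false_eq_true, if_true]
      exact ih s cols rows blks (a+1) run (by omega)

-- a pass never increases the number of zeros, and reports run=true only if it
-- inherited it or it strictly filled a cell
lemma passB_count (k : Nat) : ∀ (s : List Int) (cols rows blks : List (PySem.Set Int))
    (a : Nat) (run : Bool), s.length - a = k →
    ((passB s cols rows blks a run).1.count 0 ≤ s.count 0 ∧
     ((passB s cols rows blks a run).2.2.2.2 = true →
        run = true ∨ (passB s cols rows blks a run).1.count 0 < s.count 0)) := by
  induction k with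
  | zero =>
    intro s cols rows blks a run hk
    rw [passB, dif_neg (by omega)]
    exact ⟨le_rfl, fun h => Or.inl h⟩
  | succ k ih =>
    intro s cols rows blks a run hk
    have h : a < s.length := by omega
    rw [passB, dif_pos h]
    by_cases hz : s[a] = 0
    · simp only [hz, ne_eq, not_true_eq_false, if_false]
      split_ifs with hn
      · have hw := filter_head_bounds _ _ rfl hn
        have hcnt := count_set_lt s a
          (((PySem.List.pyRange 1 10 1).filter (fun v => !(PySem.Set.contains
            (PySem.Set.union
              (PySem.Set.union (cols.getD (a % 9) PySem.Set.empty)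
                (rows.getD (a / 9) PySem.Set.empty))
              (blks.getD (blkOf a) PySem.Set.empty)) v))).headD 0) h hz (by omega)
        obtain ⟨ih1, ih2⟩ := ih (s.set a _) _ _ _ (a+1) true
          (by simp only [List.length_set]; omega)
        exact ⟨le_trans ih1 hcnt.le, fun _ => Or.inr (lt_of_le_of_lt ih1 hcnt)⟩
      · exact ih s cols rows blks (a+1) run (by omega)
    · simp only [hz, ne_eq, not_false_eq_true, if_true]
      exact ih s cols rows blks (a+1) run (by omega)

-- the two while-loops agree
lemma loop_eq (N : Nat) : ∀ (s : List Int) (cols rows blks : List (PySem.Set Int)),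
    s.count 0 < N → s.length ≤ 81 → BInv s cols rows blks →
    loopA N s = loopB N s cols rows blks := by
  induction N with
  | zero => intro s cols rows blks hN; omega
  | succ N ih =>
    intro s cols rows blks hN hlen hinv
    obtain ⟨hps, hinv'⟩ := pass_eq (s.length - 0) s cols rows blks 0 false rfl hlen hinv
    have h1 : (passA s 0 false).1 = (passB s cols rows blks 0 false).1 := by rw [hps]
    have h2 : (passA s 0 false).2 = (passB s cols rows blks 0 false).2.2.2.2 := by rw [hps]
    rw [loopA, loopB, h1, h2]
    have hlen' := passB_len (s.length - 0) s cols rows blks 0 false rfl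
    obtain ⟨hcle, hclt⟩ := passB_count (s.length - 0) s cols rows blks 0 false rfl
    by_cases hrun : (passB s cols rows blks 0 false).2.2.2.2 = true
    · simp only [hrun, if_true]
      have : (passB s cols rows blks 0 false).1.count 0 < s.count 0 := by
        rcases hclt hrun with hq | hq
        · exact absurd hq (by simp)
        · exact hq
      exact ih _ _ _ _ (by omega) (by omega) hinv'
    · simp [hrun]

-- ===== VERDICT (by name: the statement is the Claim_ definition above) =====
theorem sure_cell_spec : Claim_equal_sure_cell := by
  intro sudoku _ hpre
  unfold Spec_sure_cell sure_cell sure_cell_alt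
  exact loop_eq (sudoku.count 0 + 1) sudoku _ _ _ (by omega) hpre (BInv_build sudoku)
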